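-- pv_equiv track=rewrite | github.com/AlexanderJCS/advent-of-code-2023 | day-12/part_1.py | is_valid_line
-- ===== SOURCE A (Python) =====
-- def is_valid_line(line: str | list[str], hashtags: list[int]) -> bool:
--     hashtags_in_row = []
--
--     hashtag_count = 0
--     for element in line + ".":
--         if element == "#":
--             hashtag_count += 1
--
--         elif hashtag_count != 0:
--             hashtags_in_row.append(hashtag_count)
--             hashtag_count = 0
--
--             if len(hashtags_in_row) > len(hashtags):
--                 return False
--
--             if hashtags_in_row[-1] != hashtags[len(hashtags_in_row) - 1]:
--                 return False
--
--     return len(hashtags_in_row) == len(hashtags)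
-- ===== SOURCE B (Python) =====
-- def is_valid_line(line: str | list[str], hashtags: list[int]) -> bool:
--     # Normalize every non-'#' character to a space, then the runs of '#'
--     # are exactly the whitespace-separated words; compare their lengths.
--     runs = [len(word) for word in "".join(c if c == "#" else " " for c in line).split()]
--     return runs == hashtags
-- ===== Notes on version B (the rewrite author's own statement) =====
-- stated objective: idiomatic
-- what changed: Replaces the stateful per-character counting loop with three early-return checks by materializing the full run-length list (normalize non-'#' chars to spaces, str.split, map len) and doing a single list equality comparison.
import Mathlib
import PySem

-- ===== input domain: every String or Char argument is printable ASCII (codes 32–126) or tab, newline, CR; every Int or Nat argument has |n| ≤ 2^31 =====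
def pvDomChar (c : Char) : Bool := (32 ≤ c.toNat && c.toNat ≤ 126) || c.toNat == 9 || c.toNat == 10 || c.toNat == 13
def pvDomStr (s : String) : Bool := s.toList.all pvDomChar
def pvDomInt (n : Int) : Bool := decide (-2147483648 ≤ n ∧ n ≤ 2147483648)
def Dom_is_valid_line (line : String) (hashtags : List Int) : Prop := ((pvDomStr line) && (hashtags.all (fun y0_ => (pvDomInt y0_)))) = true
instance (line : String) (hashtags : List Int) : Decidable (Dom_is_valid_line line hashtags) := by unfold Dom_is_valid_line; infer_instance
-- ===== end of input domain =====

-- B replaces A's stateful counting loop with early exits by materializing the full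
-- run-length list (non-'#' chars normalized to spaces, split, lengths) and one
-- list-equality comparison (objective: idiomatic).

-- ===== PORT A =====
-- the for-loop of A: state = (hashtags_in_row, hashtag_count); early `return False` = `false`
def isValidLoop (hashtags : List Int) : List Char → List Int → Int → Bool
  | [], acc, _ => acc.length == hashtags.length
  | c :: rest, acc, cnt =>
    if c = '#' then isValidLoop hashtags rest acc (cnt + 1)
    else if cnt ≠ 0 then
      let acc' := acc ++ [cnt]
      if acc'.length > hashtags.length then false
      else if PySem.List.pyGet? acc' (-1) ≠ PySem.List.pyGet? hashtags ((acc'.length : Int) - 1) then false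
      else isValidLoop hashtags rest acc' 0
    else isValidLoop hashtags rest acc cnt

def is_valid_line (line : String) (hashtags : List Int) : Bool :=
  isValidLoop hashtags (line.toList ++ ['.']) [] 0

-- ===== PORT B =====
def is_valid_line_alt (line : String) (hashtags : List Int) : Bool :=
  -- "".join(c if c == "#" else " " for c in line)
  let norm : String := String.ofList (line.toList.map (fun c => if c = '#' then c else ' '))
  -- runs = [len(word) for word in norm.split()]
  let runs : List Int := (PySem.Str.split₀ norm).map (fun w => (PySem.Str.len w : Int))
  runs == hashtags

-- ===== PRECONDITION & SPEC =====
def Spec_is_valid_line (line : String) (hashtags : List Int) (out : Bool) : Prop := out = is_valid_line_alt line hashtags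
instance (line : String) (hashtags : List Int) (out : Bool) : Decidable (Spec_is_valid_line line hashtags out) := by unfold Spec_is_valid_line; infer_instance

-- ===== CLAIM (what is proved, stated in full; the proofs are below) =====
def Claim_equal_is_valid_line : Prop := ∀ (line : String) (hashtags : List Int), Dom_is_valid_line line hashtags → Spec_is_valid_line line hashtags (is_valid_line line hashtags)

-- ===== LEMMAS AND PROOFS =====

-- run lengths of '#' in cs, with cnt the pending run length; a pending run left at
-- the end is dropped (both programs see a terminating separator: A appends '.',
-- B's final word is flushed by split₀ itself — made precise in the two lemmas)
def runsFrom : Int → List Char → List Int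
  | _, [] => []
  | cnt, c :: rest =>
    if c = '#' then runsFrom (cnt + 1) rest
    else if cnt ≠ 0 then cnt :: runsFrom 0 rest else runsFrom 0 rest

-- A's loop computes: "acc ++ the remaining runs equals hashtags" (as long as acc is
-- a prefix of hashtags — its early exits maintain exactly that invariant)
theorem isValidLoop_eq (hashtags : List Int) (cs : List Char) (acc : List Int) (cnt : Int)
    (h : acc <+: hashtags) :
    isValidLoop hashtags cs acc cnt = decide (acc ++ runsFrom cnt cs = hashtags) := by
  induction cs generalizing acc cnt with
  | nil =>
    simp only [isValidLoop, runsFrom, List.append_nil]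
    rcases h with ⟨t, rfl⟩
    cases t with
    | nil => simp
    | cons x t => simp
  | cons c rest ih =>
    simp only [isValidLoop, runsFrom]
    by_cases hc : c = '#'
    · simp only [hc, if_pos rfl]
      exact ih acc (cnt + 1) h
    · simp only [if_neg hc]
      by_cases hz : cnt ≠ 0
      · simp only [if_pos hz]
        by_cases hlen : (acc ++ [cnt]).length > hashtags.length
        · simp only [if_pos hlen]
          have : ¬ (acc ++ cnt :: runsFrom 0 rest = hashtags) := by
            intro he
            have := congrArg List.length he
            simp at this hlen; omega
          simp [this]
        · simp only [if_neg hlen]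
          have hlen' : acc.length + 1 ≤ hashtags.length := by
            simp at hlen; omega
          have hg1 : PySem.List.pyGet? (acc ++ [cnt]) (-1) = some cnt := by
            simp [PySem.List.pyGet?, PySem.List.pyIdx?]
          have hg2 : PySem.List.pyGet? hashtags (((acc ++ [cnt]).length : Int) - 1) = some (hashtags[acc.length]'(by omega)) := by
            have : ((acc ++ [cnt]).length : Int) - 1 = (acc.length : Nat) := by simp
            rw [this, PySem.List.pyGet?_natCast]
            simp [List.getElem?_eq_getElem (by omega : acc.length < hashtags.length)]
          by_cases hne : PySem.List.pyGet? (acc ++ [cnt]) (-1) ≠ PySem.List.pyGet? hashtags (((acc ++ [cnt]).length : Int) - 1)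
          · simp only [if_pos hne]
            rw [hg1, hg2] at hne
            have : ¬ (acc ++ cnt :: runsFrom 0 rest = hashtags) := by
              intro he
              apply hne
              have : hashtags[acc.length]'(by omega) = cnt := by
                subst he
                simp [List.getElem_append_right (le_refl acc.length)]
              simp [this]
            simp [this]
          · simp only [if_neg hne]
            rw [hg1, hg2] at hne
            push_neg at hne
            have hcv : hashtags[acc.length]'(by omega) = cnt := by
              injection hne with h'; exact h'.symm
            have hpre : acc ++ [cnt] <+: hashtags := by
              rcases h with ⟨t, rfl⟩
              have ht : t ≠ [] := by
                intro h0; subst h0; simp at hlen'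
              rcases t with _ | ⟨x, t'⟩
              · simp at ht
              · have : x = cnt := by
                  rw [← hcv]
                  simp [List.getElem_append_right (le_refl acc.length)]
                subst this
                exact ⟨t', by simp⟩
            have := ih (acc ++ [cnt]) 0 hpre
            simp only [this]
            simp
      · simp only [if_neg hz]
        push_neg at hz
        subst hz
        exact ih acc 0 h

-- B's split₀ on the normalized string yields exactly the runs of '#', pending run included
theorem split₀_norm (cs : List Char) (cnt : Int) (hc : 0 ≤ cnt) (acc : List (List Char)) :
    (PySem.Chars.split₀.go (cs.map (fun c => if c = '#' then c else ' '))
        (List.replicate cnt.toNat '#') acc).map (fun w => (w.length : Int))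
      = acc.reverse.map (fun w => (w.length : Int)) ++ runsFrom cnt (cs ++ ['.']) := by
  induction cs generalizing cnt acc with
  | nil =>
    by_cases hz : cnt = 0
    · subst hz; simp [PySem.Chars.split₀.go, runsFrom]
    · have h1 : (List.replicate cnt.toNat '#').isEmpty = false := by
        simp; omega
      have h2 : ((cnt.toNat : Int)) = cnt := by omega
      simp [PySem.Chars.split₀.go, runsFrom, h1, hz, h2]
  | cons c rest ih =>
    by_cases hch : c = '#'
    · subst hch
      have hsp : PySem.Chars.isspace '#' = false := by decide
      have hrep : ('#' :: List.replicate cnt.toNat '#') = List.replicate (cnt + 1).toNat '#' := by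
        have h3 : (cnt + 1).toNat = cnt.toNat + 1 := by omega
        rw [h3, List.replicate_succ]
      simp only [List.map_cons, if_true, PySem.Chars.split₀.go, runsFrom, List.cons_append]
      rw [hsp]
      simp only [Bool.false_eq_true, if_false]
      rw [hrep]
      exact ih (cnt + 1) (by omega) acc
    · have hsp : PySem.Chars.isspace ' ' = true := by decide
      simp only [List.map_cons, PySem.Chars.split₀.go, runsFrom, List.cons_append]
      rw [if_neg hch, if_neg hch, hsp]
      simp only [if_true]
      by_cases hz : cnt = 0
      · subst hz
        simp only [Int.toNat_zero, List.replicate_zero, List.isEmpty_nil, if_true, ne_eq,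
          not_true_eq_false, if_false]
        exact ih 0 le_rfl acc
      · have hne : (List.replicate cnt.toNat '#').isEmpty = false := by
          simp; omega
        rw [hne]
        simp only [Bool.false_eq_true, if_false]
        rw [if_pos hz]
        have := ih 0 le_rfl ((List.replicate cnt.toNat '#').reverse :: acc)
        simp only [Int.toNat_zero, List.replicate_zero] at this
        rw [this]
        simp only [List.reverse_cons, List.map_append, List.map_cons, List.map_nil,
          List.length_reverse, List.length_replicate]
        have h2 : ((cnt.toNat : Int)) = cnt := by omega
        simp [h2]

-- ===== VERDICT (by name: the statement is the Claim_ definition above) =====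
theorem is_valid_line_spec : Claim_equal_is_valid_line := by
  intro line hashtags _
  unfold Spec_is_valid_line is_valid_line is_valid_line_alt
  rw [isValidLoop_eq hashtags _ [] 0 List.nil_prefix]
  have hb : (PySem.Str.split₀ (String.ofList (line.toList.map (fun c => if c = '#' then c else ' ')))).map
      (fun w => (PySem.Str.len w : Int)) = runsFrom 0 (line.toList ++ ['.']) := by
    have h1 := split₀_norm line.toList 0 le_rfl []
    simp only [Int.toNat_zero, List.replicate_zero, List.reverse_nil, List.map_nil,
      List.nil_append] at h1
    rw [← h1]
    simp [PySem.Str.split₀, PySem.Chars.split₀, PySem.Str.len]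
  simp only [hb]
  simp only [List.nil_append]
  by_cases h : runsFrom 0 (line.toList ++ ['.']) = hashtags
  · simp [h]
  · rw [Bool.eq_iff_iff]
    simp [h]
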